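-- pv_equiv track=rewrite | github.com/Sovik89/Scaler_inter_n_advanced | advanced_heaps_product_of_3.py | solve
-- ===== SOURCE A (Python) =====
-- import math,heapq
--
-- def solve(A):
--     n=len(A)
--
--     #heapq.heapify(A)
--     min_heap=[]
--     output_list=[]
--
--     for i in range(n):
--
--         heapq.heappush(min_heap,A[i])
--
--         if i<2:
--             output_list.append(-1)
--
--         elif i==2:
--             output_list.append(math.prod(min_heap))
--         else:
--             heapq.heappop(min_heap)
--             output_list.append(math.prod(min_heap))
--
--     return output_list
-- ===== SOURCE B (Python) =====
-- import math
--
-- def solve(A):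
--     return [-1 if i < 2 else math.prod(sorted(A[:i + 1])[-3:])
--             for i in range(len(A))]
-- ===== Notes on version B (the rewrite author's own statement) =====
-- stated objective: simpler
-- what changed: Removes the incremental min-heap and all running state: each output element is recomputed from scratch as the product of the last three elements of the fully sorted prefix A[:i+1], a one-line stateless comprehension.
import Mathlib
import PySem

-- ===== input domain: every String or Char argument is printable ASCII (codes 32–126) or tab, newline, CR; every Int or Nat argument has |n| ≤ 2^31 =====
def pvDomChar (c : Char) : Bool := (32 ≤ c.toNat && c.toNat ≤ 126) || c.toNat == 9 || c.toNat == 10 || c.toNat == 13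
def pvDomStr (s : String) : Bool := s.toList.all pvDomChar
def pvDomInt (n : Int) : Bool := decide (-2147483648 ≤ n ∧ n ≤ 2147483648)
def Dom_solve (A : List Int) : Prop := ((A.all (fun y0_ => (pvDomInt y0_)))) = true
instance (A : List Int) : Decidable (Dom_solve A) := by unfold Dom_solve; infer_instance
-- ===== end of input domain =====

-- B removes the heap and all running state: each output element is recomputed from scratch
-- as the product of the last three elements of the fully sorted prefix (objective: simpler;
-- asymptotically slower, O(n^2 log n) vs A's O(n)). Return-value equivalence only.

-- ===== PORT A =====
-- math.prod(l)
def mathProd (l : List Int) : Int := l.foldl (· * ·) 1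

-- CPython heapq._siftdown inner while-loop; 'newitem' is heap[pos] at entry.
def siftdownLoop (heap : List Int) (startpos pos : Nat) (newitem : Int) : List Int :=
  if _h : startpos < pos then
    let parentpos := (pos - 1) / 2
    let parent := heap.getD parentpos 0
    if newitem < parent then
      siftdownLoop (heap.set pos parent) startpos parentpos newitem
    else heap.set pos newitem
  else heap.set pos newitem
termination_by pos
decreasing_by omega

-- heapq._siftdown(heap, startpos, pos)
def siftdown (heap : List Int) (startpos pos : Nat) : List Int :=
  siftdownLoop heap startpos pos (heap.getD pos 0)

-- CPython heapq._siftup inner while-loop; returns (heap, final pos)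
def siftupLoop (heap : List Int) (pos endpos : Nat) (newitem : Int) : List Int × Nat :=
  if _h : 2 * pos + 1 < endpos then
    let childpos := 2 * pos + 1
    let childpos' :=
      if childpos + 1 < endpos ∧ ¬ (heap.getD childpos 0 < heap.getD (childpos + 1) 0)
      then childpos + 1 else childpos
    siftupLoop (heap.set pos (heap.getD childpos' 0)) childpos' endpos newitem
  else (heap.set pos newitem, pos)
termination_by endpos - pos
decreasing_by
  split <;> omega

-- heapq._siftup(heap, pos)
def siftup (heap : List Int) (pos : Nat) : List Int :=
  let newitem := heap.getD pos 0
  let r := siftupLoop heap pos heap.length newitem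
  siftdown r.1 pos r.2

-- heapq.heappush(heap, item): append, then _siftdown(heap, 0, len(heap)-1)
def heappush (heap : List Int) (item : Int) : List Int :=
  let h := heap ++ [item]
  siftdown h 0 (h.length - 1)

-- heapq.heappop(heap): (popped value, remaining heap); A only pops non-empty heaps
def heappop (heap : List Int) : Int × List Int :=
  let lastelt := heap.getLastD 0
  let rest := heap.dropLast
  if rest ≠ [] then
    (rest.getD 0 0, siftup (rest.set 0 lastelt) 0)
  else (lastelt, rest)

def solve (A : List Int) : List Int :=
  let n : Int := PySem.List.len A
  let res := (PySem.List.pyRange 0 n 1).foldl (fun (st : List Int × List Int) i =>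
      let min_heap := heappush st.1 (PySem.List.pyGetD A i 0)
      if i < 2 then (min_heap, st.2 ++ [-1])
      else if i = 2 then (min_heap, st.2 ++ [mathProd min_heap])
      else
        let pr := heappop min_heap
        (pr.2, st.2 ++ [mathProd pr.2]))
    ([], [])
  res.2

-- ===== PORT B =====
-- [-1 if i < 2 else math.prod(sorted(A[:i+1])[-3:]) for i in range(len(A))]
def solve_alt (A : List Int) : List Int :=
  (PySem.List.pyRange 0 (PySem.List.len A) 1).map (fun i =>
    if i < 2 then (-1 : Int)
    else mathProd (PySem.List.slice
      (PySem.List.sorted (PySem.List.slice A none (some (i + 1))) (fun x => x) false)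
      (some (-3)) none))

-- ===== PRECONDITION & SPEC =====
def Spec_solve (A : List Int) (out : List Int) : Prop := out = solve_alt A
instance (A : List Int) (out : List Int) : Decidable (Spec_solve A out) := by unfold Spec_solve; infer_instance

-- ===== CLAIM (what is proved, stated in full; the proofs are below) =====
def Claim_equal_solve : Prop := ∀ (A : List Int), Dom_solve A → Spec_solve A (solve A)

-- ===== LEMMAS AND PROOFS =====

-- B's per-index value, as a function of the prefix p = A[:i+1]
def top3 (p : List Int) : List Int :=
  (PySem.List.sorted p (fun x => x) false).drop (p.length - 3)

-- B rewritten prefix-recursively: p is the already-seen prefix, rest the remaining elements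
def bAux (p rest : List Int) : List Int :=
  match rest with
  | [] => []
  | x :: r =>
    (if p.length < 2 then (-1 : Int) else mathProd (top3 (p ++ [x]))) :: bAux (p ++ [x]) r

def stepAfun (st : List Int × List Int) (q : Int × Int) : List Int × List Int :=
  let min_heap := heappush st.1 q.2
  if q.1 < 2 then (min_heap, st.2 ++ [-1])
  else if q.1 = 2 then (min_heap, st.2 ++ [mathProd min_heap])
  else
    let pr := heappop min_heap
    (pr.2, st.2 ++ [mathProd pr.2])

-- loop invariant relating A's heap to the processed prefix p
def Good (p heap : List Int) : Prop :=
  (p = [] ∧ heap = [])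
  ∨ (∃ a, p = [a] ∧ heap = [a])
  ∨ (∃ a b, p = [a, b] ∧ heap = [min a b, max a b])
  ∨ (3 ≤ p.length ∧ ∃ a b c, heap = [a, b, c] ∧ a ≤ b ∧ a ≤ c
      ∧ top3 p = [a, min b c, max b c])

lemma mathProd_eq_prod (l : List Int) : mathProd l = l.prod := by
  simp [mathProd, List.prod_eq_foldl]

lemma mathProd_perm {l l' : List Int} (h : l.Perm l') : mathProd l = mathProd l' := by
  rw [mathProd_eq_prod, mathProd_eq_prod, h.prod_eq]

lemma prod3_perm_eq (p q r u v w : Int)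
    (h : (p = u ∧ q = v ∧ r = w) ∨ (p = u ∧ q = w ∧ r = v) ∨ (p = v ∧ q = u ∧ r = w)
       ∨ (p = v ∧ q = w ∧ r = u) ∨ (p = w ∧ q = u ∧ r = v) ∨ (p = w ∧ q = v ∧ r = u)) :
    1 * p * q * r = 1 * u * v * w := by
  rcases h with ⟨rfl,rfl,rfl⟩|⟨rfl,rfl,rfl⟩|⟨rfl,rfl,rfl⟩|⟨rfl,rfl,rfl⟩|⟨rfl,rfl,rfl⟩|⟨rfl,rfl,rfl⟩ <;>
    ring

lemma push3 (a b c x : Int) : heappush [a,b,c] x =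
    if x < b then (if x < a then [x,a,c,b] else [a,x,c,b]) else [a,b,c,x] := by
  simp [heappush, siftdown, siftdownLoop]

lemma push2 (a b x : Int) : heappush [a,b] x =
    if x < a then [x,b,a] else [a,b,x] := by
  simp [heappush, siftdown, siftdownLoop]

lemma push1 (a x : Int) : heappush [a] x = if x < a then [x,a] else [a,x] := by
  simp [heappush, siftdown, siftdownLoop]

lemma push0 (x : Int) : heappush [] x = [x] := by
  simp [heappush, siftdown, siftdownLoop]

lemma siftupLoop3 (b c d e : Int) : siftupLoop [d,b,c] 0 3 e =
    if b < c then ([b, e, c], 1) else ([c, b, e], 2) := by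
  by_cases hbc : b < c
  · rw [siftupLoop]; simp [hbc, siftupLoop]
  · rw [siftupLoop]; simp [hbc, siftupLoop]

lemma sift3 (b c d : Int) : siftup [d,b,c] 0 =
    if b < c then (if d < b then [d,b,c] else [b,d,c])
    else (if d < c then [d,b,c] else [c,b,d]) := by
  simp only [siftup, List.length_cons, List.length_nil]
  rw [show ((0:Nat) + 1 + 1 + 1) = 3 from rfl, show ([d,b,c].getD (0:Nat) 0) = d from rfl,
    siftupLoop3]
  by_cases hbc : b < c <;> simp [hbc, siftdown, siftdownLoop]

lemma pop4 (a b c d : Int) : (heappop [a,b,c,d]).2 =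
    if b < c then (if d < b then [d,b,c] else [b,d,c])
    else (if d < c then [d,b,c] else [c,b,d]) := by
  rw [show (heappop [a,b,c,d]).2 = siftup [d,b,c] 0 from rfl, sift3]

-- stable insertion step of PySem's sorted, specialised to Int with the identity key
def ins (x : Int) (s : List Int) : List Int :=
  PySem.List.insertBy (fun a b => decide (a < b)) x s

lemma sorted_append_single (p : List Int) (x : Int) :
    PySem.List.sorted (p ++ [x]) (fun y => y) false
      = ins x (PySem.List.sorted p (fun y => y) false) := by
  rw [PySem.List.sorted_eq_foldl_insertBy, PySem.List.sorted_eq_foldl_insertBy,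
    List.foldl_append]
  rfl

lemma drop_ins (x : Int) : ∀ (k : Nat) (s : List Int), s.Pairwise (· ≤ ·) →
    s.length = k + 3 → (ins x s).drop (k + 1) = (ins x (s.drop k)).drop 1 := by
  intro k
  induction k with
  | zero => intro s _ _; simp
  | succ k ih =>
    intro s hs hlen
    cases s with
    | nil => simp at hlen
    | cons y s' =>
      have hPs' : s'.Pairwise (· ≤ ·) := (List.pairwise_cons.mp hs).2
      have hy : ∀ z ∈ s', y ≤ z := (List.pairwise_cons.mp hs).1
      have hlen' : s'.length = k + 3 := by simpa using hlen
      show (ins x (y :: s')).drop (k + 2) = (ins x ((y :: s').drop (k + 1))).drop 1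
      rw [show (y :: s').drop (k + 1) = s'.drop k from rfl]
      by_cases hxy : x < y
      · -- x inserted at the very front; it would also sit in front of s'.drop k
        have h1 : ins x (y :: s') = x :: y :: s' := by
          simp [ins, PySem.List.insertBy, hxy]
        obtain ⟨u, t, hut⟩ : ∃ u t, s'.drop k = u :: t := by
          cases h : s'.drop k with
          | nil => exfalso; have := List.length_drop (l := s') (i := k); rw [h] at this; simp at this; omega
          | cons u t => exact ⟨u, t, rfl⟩
        have hu : y ≤ u := hy u (List.mem_of_mem_drop (by rw [hut]; exact List.mem_cons_self))
        have hxu : x < u := lt_of_lt_of_le hxy hu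
        have h2 : ins x (s'.drop k) = x :: u :: t := by
          rw [hut]; simp [ins, PySem.List.insertBy, hxu]
        rw [h1, h2]
        simp [List.drop_succ_cons, hut]
      · have h1 : ins x (y :: s') = y :: ins x s' := by
          simp [ins, PySem.List.insertBy, hxy]
        rw [h1, List.drop_succ_cons, ih s' hPs' hlen']

lemma top3_length3 (p : List Int) (h : p.length = 3) :
    top3 p = PySem.List.sorted p (fun x => x) false := by
  simp [top3, h]

lemma top3_step (p : List Int) (x u v w : Int) (h3 : 3 ≤ p.length)
    (ht : top3 p = [u, v, w]) :
    top3 (p ++ [x]) =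
      if x < u then [u, v, w]
      else if x < v then [x, v, w]
      else if x < w then [v, x, w]
      else [v, w, x] := by
  have hlen : (PySem.List.sorted p (fun y => y) false).length = p.length :=
    PySem.List.length_sorted p _ _
  have hdrop : (PySem.List.sorted p (fun y => y) false).drop (p.length - 3) = [u, v, w] := ht
  have hmain := drop_ins x (p.length - 3) (PySem.List.sorted p (fun y => y) false)
    (PySem.List.sorted_pairwise p (fun y => y)) (by omega)
  have h1 : top3 (p ++ [x])
      = (ins x (PySem.List.sorted p (fun y => y) false)).drop ((p.length - 3) + 1) := by
    simp only [top3, List.length_append, List.length_cons, List.length_nil,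
      sorted_append_single]
    congr 1
    omega
  rw [h1, hmain, hdrop]
  by_cases h4 : x < u
  · simp [ins, PySem.List.insertBy, h4]
  · by_cases h5 : x < v
    · simp [ins, PySem.List.insertBy, h4, h5]
    · by_cases h6 : x < w
      · simp [ins, PySem.List.insertBy, h4, h5, h6]
      · simp [ins, PySem.List.insertBy, h4, h5, h6]

lemma minmax_perm (a b : Int) : ([min a b, max a b] : List Int).Perm [a, b] := by
  rcases le_total a b with h | h
  · rw [min_eq_left h, max_eq_right h]
  · rw [min_eq_right h, max_eq_left h]
    exact List.Perm.swap a b []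

lemma pairwise3 (p q r : Int) (h1 : p ≤ q) (h2 : p ≤ r) (h3 : q ≤ r) :
    List.Pairwise (· ≤ ·) [p, q, r] := by
  simp only [List.pairwise_cons, List.mem_cons, List.not_mem_nil]
  constructor
  · intro z hz; rcases hz with rfl | hz
    · exact h1
    · simp at hz; omega
  · constructor
    · intro z hz; simp at hz; omega
    · constructor
      · intro z hz; simp at hz
      · exact List.Pairwise.nil

lemma sorted3_of (a b x p q r : Int) (hperm : ([p, q, r] : List Int).Perm [a, b, x])
    (h1 : p ≤ q) (h2 : p ≤ r) (h3 : q ≤ r) :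
    PySem.List.sorted ([a, b, x] : List Int) (fun y => y) false = [p, q, r] :=
  PySem.List.sorted_id_eq_of_perm_of_pairwise _ _ hperm (pairwise3 p q r h1 h2 h3)

-- per-element step: A's fold step produces B's entry and preserves the invariant
lemma step_ok (p heap out : List Int) (x : Int) (hG : Good p heap) :
    (stepAfun (heap, out) ((p.length : Int), x)).2
      = out ++ [if p.length < 2 then (-1 : Int) else mathProd (top3 (p ++ [x]))]
    ∧ Good (p ++ [x]) (stepAfun (heap, out) ((p.length : Int), x)).1 := by
  rcases hG with ⟨rfl, rfl⟩ | ⟨a, rfl, rfl⟩ | ⟨a, b, rfl, rfl⟩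
    | ⟨h3, a, b, c, rfl, hab, hac, htop⟩
  · -- p = []: first element
    refine ⟨by norm_num [stepAfun, push0], ?_⟩
    have h1 : (stepAfun ([], out) (((([] : List Int).length : Nat) : Int), x)).1 = [x] := by
      norm_num [stepAfun, push0]
    rw [h1]
    exact Or.inr (Or.inl ⟨x, rfl, rfl⟩)
  · -- p = [a]: second element
    refine ⟨by norm_num [stepAfun], ?_⟩
    have h1 : (stepAfun ([a], out) ((([a] : List Int).length : Int), x)).1
        = [min a x, max a x] := by
      simp only [stepAfun, push1, List.length_cons, List.length_nil]
      norm_num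
      split_ifs with h
      · rw [min_eq_right (le_of_lt h), max_eq_left (le_of_lt h)]
      · rw [min_eq_left (by omega), max_eq_right (by omega)]
    rw [h1]
    exact Or.inr (Or.inr (Or.inl ⟨a, x, rfl, rfl⟩))
  · -- p = [a, b]: third element, A takes the i == 2 branch
    have hmm : min a b ≤ max a b := min_le_max
    have hfst : (stepAfun ([min a b, max a b], out) ((([a, b] : List Int).length : Int), x)).1
        = heappush [min a b, max a b] x := by
      norm_num [stepAfun]
    have hsnd : (stepAfun ([min a b, max a b], out) ((([a, b] : List Int).length : Int), x)).2
        = out ++ [mathProd (heappush [min a b, max a b] x)] := by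
      norm_num [stepAfun]
    rw [hfst, hsnd]
    have htp : top3 ([a, b] ++ [x]) = PySem.List.sorted ([a, b, x] : List Int) (fun y => y) false :=
      top3_length3 _ (by simp)
    rw [push2]
    by_cases hx : x < min a b
    · have hs : PySem.List.sorted ([a, b, x] : List Int) (fun y => y) false
          = [x, min a b, max a b] :=
        sorted3_of a b x x (min a b) (max a b)
          (((minmax_perm a b).cons x).trans (List.perm_append_singleton x [a, b]).symm)
          (by omega) (by omega) hmm
      rw [if_pos hx]
      constructor
      · rw [if_neg (by norm_num), htp, hs]
        refine congrArg (fun z => out ++ [z]) ?_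
        simp only [mathProd, List.foldl]
        ring
      · refine Or.inr (Or.inr (Or.inr ⟨by simp, x, max a b, min a b, rfl, by omega, by omega, ?_⟩))
        rw [htp, hs, min_eq_right hmm, max_eq_left hmm]
    · have hs : PySem.List.sorted ([a, b, x] : List Int) (fun y => y) false
          = [min a b, min (max a b) x, max (max a b) x] :=
        sorted3_of a b x (min a b) (min (max a b) x) (max (max a b) x)
          (((minmax_perm (max a b) x).cons (min a b)).trans
            ((minmax_perm a b).append_right [x]))
          (by omega) (by omega) (by omega)
      rw [if_neg hx]
      constructor
      · rw [if_neg (by norm_num), htp, hs]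
        exact congrArg (fun z => out ++ [z])
          (mathProd_perm ((minmax_perm (max a b) x).cons (min a b))).symm
      · refine Or.inr (Or.inr (Or.inr ⟨by simp, min a b, max a b, x, rfl, hmm, by omega, ?_⟩))
        rw [htp, hs]
  · -- steady state: |p| ≥ 3, heap = [a,b,c], a ≤ b, a ≤ c
    have hn2 : ¬ ((p.length : Int) < 2) := by omega
    have hne2 : ¬ ((p.length : Int) = 2) := by omega
    have hnlt : ¬ (p.length < 2) := by omega
    have htp := top3_step p x a (min b c) (max b c) h3 htop
    have hlen : 3 ≤ (p ++ [x]).length := by simp; omega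
    have hfst : (stepAfun ([a, b, c], out) ((p.length : Int), x)).1
        = (heappop (heappush [a, b, c] x)).2 := by
      simp only [stepAfun, hn2, hne2, if_false]
    have hsnd : (stepAfun ([a, b, c], out) ((p.length : Int), x)).2
        = out ++ [mathProd (heappop (heappush [a, b, c] x)).2] := by
      simp only [stepAfun, hn2, hne2, if_false]
    rw [hfst, hsnd, if_neg hnlt, push3]
    rcases le_total b c with hbc | hbc
    · rw [min_eq_left hbc, max_eq_right hbc] at htp
      split_ifs <;> rw [pop4] <;> split_ifs
      all_goals refine ⟨congrArg (fun z => out ++ [z]) ?_,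
        Or.inr (Or.inr (Or.inr ⟨hlen, _, _, _, rfl, by omega, by omega, ?_⟩))⟩
      all_goals (rw [htp]; split_ifs <;>
        first
          | (simp only [mathProd, List.foldl]; apply prod3_perm_eq; omega)
          | (simp only [List.cons.injEq, true_and, and_true,
               min_def, max_def];
             all_goals ((try split_ifs) <;> first | trivial | omega)))
    · rw [min_eq_right hbc, max_eq_left hbc] at htp
      split_ifs <;> rw [pop4] <;> split_ifs
      all_goals refine ⟨congrArg (fun z => out ++ [z]) ?_,
        Or.inr (Or.inr (Or.inr ⟨hlen, _, _, _, rfl, by omega, by omega, ?_⟩))⟩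
      all_goals (rw [htp]; split_ifs <;>
        first
          | (simp only [mathProd, List.foldl]; apply prod3_perm_eq; omega)
          | (simp only [List.cons.injEq, true_and, and_true,
               min_def, max_def];
             all_goals ((try split_ifs) <;> first | trivial | omega)))

lemma loop_eq : ∀ (rest p heap out : List Int), Good p heap →
    ((PySem.List.enumerate rest (p.length : Int)).foldl stepAfun (heap, out)).2
      = out ++ bAux p rest := by
  intro rest
  induction rest with
  | nil => intro p heap out _; simp [PySem.List.enumerate_nil, bAux]
  | cons x r ih =>
    intro p heap out hG
    obtain ⟨hout, hG'⟩ := step_ok p heap out x hG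
    simp only [PySem.List.enumerate_cons, List.foldl_cons, bAux]
    have hst : stepAfun (heap, out) ((p.length : Int), x)
        = ((stepAfun (heap, out) ((p.length : Int), x)).1,
           (stepAfun (heap, out) ((p.length : Int), x)).2) := rfl
    have hlen : ((p.length : Int) + 1) = (((p ++ [x]).length : Nat) : Int) := by
      simp
    rw [hst, hout, hlen, ih (p ++ [x]) _ _ hG']
    simp

lemma solve_eq_fold (A : List Int) :
    solve A = ((PySem.List.enumerate A 0).foldl stepAfun ([], [])).2 := by
  rw [PySem.List.enumerate_eq_map_pyRange (d := 0), List.foldl_map]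
  rfl

lemma bAux_map (rest : List Int) : ∀ (p : List Int),
    bAux p rest = (List.range rest.length).map (fun j =>
      if p.length + j < 2 then (-1 : Int) else mathProd (top3 (p ++ rest.take (j + 1)))) := by
  induction rest with
  | nil => intro p; simp [bAux]
  | cons x r ih =>
    intro p
    rw [bAux, List.length_cons, List.range_succ_eq_map, List.map_cons, List.map_map,
      ih (p ++ [x])]
    congr 1
    apply List.map_congr_left
    intro j _
    have h1 : p.length + 1 + j = p.length + (j + 1) := by omega
    have h2 : p ++ [x] ++ List.take (j + 1) r = p ++ x :: List.take (j + 1) r := by simp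
    simp [h1, h2]

lemma solve_alt_eq_bAux (A : List Int) : solve_alt A = bAux [] A := by
  rw [bAux_map]
  simp only [solve_alt, PySem.List.len_eq, PySem.List.pyRange_one, List.map_map,
    Int.sub_zero, Int.toNat_natCast]
  apply List.map_congr_left
  intro k _
  simp only [Function.comp, List.length_nil, Nat.zero_add, List.nil_append, Int.zero_add]
  have hcond : ((k : Int) < 2) ↔ (k < 2) := by omega
  by_cases hk : k < 2
  · simp [hcond.mpr hk, hk]
  · rw [if_neg (by omega), if_neg hk]
    have hslice : PySem.List.slice A none (some ((k : Int) + 1)) = A.take (k + 1) := by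
      have : ((k : Int) + 1) = (((k + 1 : Nat) : Int)) := by push_cast; ring
      rw [this, PySem.List.slice_to_natCast]
    rw [hslice]
    congr 1
    rw [PySem.List.slice_from_neg_ofNat _ 3 (by omega), PySem.List.length_sorted]
    rfl

-- ===== VERDICT (by name: the statement is the Claim_ definition above) =====
theorem solve_spec : Claim_equal_solve := by
  intro A _
  unfold Spec_solve
  rw [solve_eq_fold, solve_alt_eq_bAux,
    show (0 : Int) = (([] : List Int).length : Int) from rfl,
    loop_eq A [] [] [] (Or.inl ⟨rfl, rfl⟩)]
  simp
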